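-- pv_equiv track=rewrite | github.com/esutko/riscos_asm_projects | prototypes/hpf.py | to_hpf
-- ===== SOURCE A (Python) =====
-- def mask(num, length):
--     """
--     Return the low order length bits of the number num.
--
--       >>> mask(10, 3)    # The low order 3 bits of 1010
--       2
--       >>> mask(711, 3)   # The low order 3 bits of 11000111
--       7
--       >>> mask(726, 5)   # The low order 5 bits of 11010110
--       22
--     """
--     return num & (2 ** length - 1)
--
-- def hpf_join(mantissa, exp, sign):
--     """
--     Join the mantissa, exponent, and sign values into a 16 bit half-precision
--     floating-point number.
--
--       >>> hpf_join(5, 9, 0)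
--       9221
--     """
--     return mask(mantissa, 10) + (mask(exp, 5) << 10) + (mask(sign, 1) << 15)
--
-- def to_hpf(i):
--     """
--     Converts the integer, i, to an equivlant half-prescion float.
--
--       >>> to_hpf(6)
--       17920
--       >>> hpf_split(to_hpf(6))
--       (512, 17, 0)
--       >>> to_hpf(-11)
--       51584
--       >>> hpf_split(to_hpf(-11))
--       (384, 18, 1)
--       >>> to_hpf(0)
--       0
--     """
--     assert (i < 1024), "integer too large"
--
--     if i == 0:
--         return 0
--
--     mantissa = abs(i)
--     exp = 24
--     sign = (1 - i//abs(i))//2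
--
--     while mantissa & (2 ** 9) == 0:
--         mantissa <<= 1
--         exp -= 1
--
--     mantissa = (mantissa << 1) & (2 ** 10 - 1)
--     return hpf_join(mantissa, exp, sign)
-- ===== SOURCE B (Python) =====
-- def to_hpf(i):
--     assert (i < 1024), "integer too large"
--
--     if i == 0:
--         return 0
--
--     sign = 1 if i < 0 else 0
--     m = abs(i) & 1023
--     b = m.bit_length()
--     return ((m << (11 - b)) & 1023) + ((14 + b) << 10) + (sign << 15)
-- ===== Notes on version B (the rewrite author's own statement) =====
-- stated objective: idiomatic
-- what changed: Replaces the while-loop normalization with a bit_length-based closed form (exp = 14 + bit_length, mantissa shifted arithmetically) and the floordiv sign trick with a plain conditional; Pre_ excludes i >= 1024 (A raises AssertionError) and negative multiples of 1024 (A's while-loop never terminates).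
-- outside the precondition, e.g. on to_hpf(1024): A raises AssertionError, B raises AssertionError; on to_hpf(-1024): A does not finish within the time limit, B returns 47104
import Mathlib
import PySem

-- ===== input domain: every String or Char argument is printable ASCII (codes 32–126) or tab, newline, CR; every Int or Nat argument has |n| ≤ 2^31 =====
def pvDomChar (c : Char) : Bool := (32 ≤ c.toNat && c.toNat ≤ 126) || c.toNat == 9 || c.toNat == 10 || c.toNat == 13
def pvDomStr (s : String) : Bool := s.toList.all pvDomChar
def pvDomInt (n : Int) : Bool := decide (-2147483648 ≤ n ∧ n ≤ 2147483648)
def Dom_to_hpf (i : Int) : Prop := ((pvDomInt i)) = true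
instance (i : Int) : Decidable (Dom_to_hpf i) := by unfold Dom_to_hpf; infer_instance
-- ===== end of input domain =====

-- B replaces A's while-loop normalization by a bit_length closed form (idiomatic arithmetic, no loop);
-- equivalence is claimed on Pre_: i < 1024 (else A's assert raises) and not a multiple of 1024 ≤ -1024
-- (there A's while-loop never terminates).

-- ===== PORT A =====
-- mask(num, length): length is always the literal 10/5/1 here; `.toNat` is exact for those nonnegative literals.
def mask (num length : Int) : Int := Int.land num (2 ^ length.toNat - 1)

def hpf_join (mantissa exp sign : Int) : Int :=
  mask mantissa 10 + Int.shiftLeft (mask exp 5) 10 + Int.shiftLeft (mask sign 1) 15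

-- the while loop; fuel only makes it total (under Pre_ it runs at most 9 iterations, fuel 64 is never exhausted)
def toHpfLoop : Nat → Int → Int → Int × Int
  | 0, m, e => (m, e)
  | f + 1, m, e => if Int.land m (2 ^ 9) = 0 then toHpfLoop f (Int.shiftLeft m 1) (e - 1) else (m, e)

def to_hpf (i : Int) : Int :=
  if i = 0 then 0
  else
    let sign := PySem.Int.floordiv (1 - PySem.Int.floordiv i |i|) 2
    match toHpfLoop 64 |i| 24 with
    | (mantissa, exp) => hpf_join (Int.land (Int.shiftLeft mantissa 1) (2 ^ 10 - 1)) exp sign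

-- ===== PORT B =====
-- abs(i) & 1023 on the nonnegative side is Nat.land on natAbs; int.bit_length is Nat.size;
-- 11 - b never underflows since m ≤ 1023 gives b ≤ 10.
def to_hpf_alt (i : Int) : Int :=
  if i = 0 then 0
  else
    let sign : Nat := if i < 0 then 1 else 0
    let m : Nat := i.natAbs &&& 1023
    let b : Nat := Nat.size m
    (((m <<< (11 - b)) &&& 1023) + ((14 + b) <<< 10) + (sign <<< 15) : Nat)

-- ===== PRECONDITION & SPEC =====
-- Pre_ excludes i ≥ 1024, where A's `assert i < 1024` raises AssertionError, and negative
-- multiples of 1024, where A's while-loop never terminates (the mantissa's low ten bits stay clear).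
def Pre_to_hpf (i : Int) : Prop := i < 1024 ∧ (-1024 < i ∨ ¬ (1024 : Int) ∣ i)
instance (i : Int) : Decidable (Pre_to_hpf i) := by unfold Pre_to_hpf; infer_instance

def pvWitness_to_hpf : Int := (-11)

def Spec_to_hpf (i : Int) (out : Int) : Prop := out = to_hpf_alt i
instance (i : Int) (out : Int) : Decidable (Spec_to_hpf i out) := by unfold Spec_to_hpf; infer_instance

-- ===== CLAIM (what is proved, stated in full; the proofs are below) =====
def Claim_equal_to_hpf : Prop := ∀ (i : Int), Dom_to_hpf i → Pre_to_hpf i → Spec_to_hpf i (to_hpf i)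

-- ===== LEMMAS AND PROOFS =====

-- bit 9 of n is set iff the low ten bits are ≥ 512
lemma land512_eq_zero_iff (n : Nat) : (n &&& 512 = 0) ↔ n % 1024 < 512 := by
  have h1 : n &&& 2 ^ 9 = (n.testBit 9).toNat * 2 ^ 9 := Nat.and_two_pow n 9
  have h2 : n.testBit 9 = decide (n / 2 ^ 9 % 2 = 1) := Nat.testBit_eq_decide_div_mod_eq
  have h3 : n % (512 * 2) / 512 = n / 512 % 2 := Nat.mod_mul_right_div_self n 512 2
  have h4 : n % 1024 < 1024 := Nat.mod_lt _ (by norm_num)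
  norm_num at h1 h2 h3
  rcases (show n / 512 % 2 = 0 ∨ n / 512 % 2 = 1 by omega) with hc | hc
  · have hbit : n.testBit 9 = false := by rw [h2]; simp [hc]
    rw [hbit] at h1
    simp only [Bool.toNat_false, Nat.zero_mul] at h1
    have h6 : n % 1024 / 512 = 0 := by rw [h3, hc]
    rw [h1]
    omega
  · have hbit : n.testBit 9 = true := by rw [h2]; simp [hc]
    rw [hbit] at h1
    simp only [Bool.toNat_true, Nat.one_mul] at h1
    have h6 : n % 1024 / 512 = 1 := by rw [h3, hc]
    rw [h1]
    omega

-- size of the low ten bits when bit 9 is set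
lemma size_low_of_ge (m : Nat) (h1 : 512 ≤ m) (h2 : m < 1024) : Nat.size m = 10 := by
  have ha : Nat.size m ≤ 10 := Nat.size_le.mpr (by omega)
  have hb : 9 < Nat.size m := Nat.lt_size.mpr (by omega)
  omega

-- closed form of A's while loop
lemma loop_closed (f : Nat) (n : Nat) (e : Int)
    (hm : n % 1024 ≠ 0) (hf : 10 - Nat.size (n % 1024) ≤ f) :
    toHpfLoop f (n : Int) e =
      (((n <<< (10 - Nat.size (n % 1024)) : Nat) : Int), e - ((10 - Nat.size (n % 1024) : Nat) : Int)) := by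
  induction f generalizing n e with
  | zero =>
      have hk : 10 - Nat.size (n % 1024) = 0 := Nat.le_zero.mp hf
      rw [hk]
      simp [toHpfLoop]
  | succ f ih =>
      have hcast : Int.land (n : Int) (2 ^ 9) = ((n &&& 512 : Nat) : Int) := rfl
      have h4 : n % 1024 < 1024 := Nat.mod_lt _ (by norm_num)
      by_cases hbit : n &&& 512 = 0
      · -- bit 9 clear: one shift, recurse
        have hlt : n % 1024 < 512 := (land512_eq_zero_iff n).mp hbit
        have hm512 : n % 512 = n % 1024 := by
          have : n % 1024 % 512 = n % 512 := Nat.mod_mod_of_dvd n (by norm_num)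
          omega
        have hdouble : (2 * n) % 1024 = 2 * (n % 1024) := by
          have := Nat.mul_mod_mul_left 2 n 512
          omega
        have hsz : Nat.size ((2 * n) % 1024) = Nat.size (n % 1024) + 1 := by
          rw [hdouble]
          have := Nat.size_shiftLeft (m := n % 1024) hm 1
          simpa [Nat.shiftLeft_eq, Nat.mul_comm] using this
        have hszle : Nat.size (n % 1024) ≤ 9 := Nat.size_le.mpr (by omega)
        have hszpos : 1 ≤ Nat.size (n % 1024) := by
          have := Nat.lt_size.mpr (show 2 ^ 0 ≤ n % 1024 by omega)
          omega
        have hshift : Int.shiftLeft (n : Int) 1 = (((2 * n : Nat)) : Int) := by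
          have : (n <<< 1 : Nat) = 2 * n := by rw [Nat.shiftLeft_eq]; ring
          rw [← this]; rfl
        have hm2 : (2 * n) % 1024 ≠ 0 := by omega
        have hf2 : 10 - Nat.size ((2 * n) % 1024) ≤ f := by omega
        have hrec := ih (2 * n) (e - 1) hm2 hf2
        rw [toHpfLoop, if_pos (by rw [hcast]; exact_mod_cast congrArg (Nat.cast : Nat → Int) hbit),
            hshift, hrec]
        refine Prod.ext ?_ ?_ <;> simp only
        · congr 1
          rw [Nat.shiftLeft_eq, Nat.shiftLeft_eq, hsz]
          have h5 : 2 ^ (10 - (Nat.size (n % 1024) + 1)) * 2 ^ 1 = 2 ^ (10 - Nat.size (n % 1024)) := by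
            rw [← pow_add]; congr 1; omega
          calc 2 * n * 2 ^ (10 - (Nat.size (n % 1024) + 1))
              = n * (2 ^ (10 - (Nat.size (n % 1024) + 1)) * 2 ^ 1) := by ring
            _ = n * 2 ^ (10 - Nat.size (n % 1024)) := by rw [h5]
        · rw [hsz]
          omega
      · -- bit 9 set: loop exits now
        have hge : 512 ≤ n % 1024 := by
          have := (land512_eq_zero_iff n).not.mp hbit
          omega
        have hsz : Nat.size (n % 1024) = 10 := size_low_of_ge _ hge h4
        rw [toHpfLoop, if_neg (by rw [hcast]; exact_mod_cast (fun h => hbit (by exact_mod_cast h)))]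
        simp [hsz]

-- the sign computed by A equals B's conditional
lemma sign_closed (i : Int) (hi : i ≠ 0) :
    PySem.Int.floordiv (1 - PySem.Int.floordiv i |i|) 2 = if i < 0 then 1 else 0 := by
  rcases lt_trichotomy i 0 with h | h | h
  · have habs : |i| = -i := abs_of_neg h
    have h1 : PySem.Int.floordiv i |i| = -1 := by
      rw [habs, PySem.Int.floordiv_eq_ediv_of_pos (by omega), Int.ediv_neg, Int.ediv_self hi]
    rw [h1, if_pos h]
    decide
  · exact absurd h hi
  · have habs : |i| = i := abs_of_pos h
    have h1 : PySem.Int.floordiv i |i| = 1 := by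
      rw [habs, PySem.Int.floordiv_eq_ediv_of_pos h, Int.ediv_self hi]
    rw [h1, if_neg (not_lt.mpr (le_of_lt h))]
    decide

-- ===== VERDICT (by name: the statement is the Claim_ definition above) =====
theorem to_hpf_spec : Claim_equal_to_hpf := by
  intro i _ hpre
  unfold Spec_to_hpf
  by_cases hi : i = 0
  · simp [to_hpf, to_hpf_alt, hi]
  obtain ⟨hlt, hrest⟩ := hpre
  set n : Nat := i.natAbs with hn
  have habs : |i| = (n : Int) := by rw [hn]; exact_mod_cast (Int.abs_eq_natAbs i)
  have hnpos : n ≠ 0 := by simpa [hn] using hi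
  -- the low ten bits are nonzero under Pre_
  have hm : n % 1024 ≠ 0 := by
    rcases lt_trichotomy i 0 with h | h | h
    · rcases hrest with h' | h'
      · have : n < 1024 := by omega
        omega
      · intro hc
        apply h'
        have : (1024 : Int) ∣ (n : Int) := by
          exact_mod_cast (Nat.dvd_of_mod_eq_zero hc).natCast
        have hni : (n : Int) = -i := by omega
        omega
    · exact absurd h hi
    · have : n < 1024 := by omega
      omega
  set b : Nat := Nat.size (n % 1024) with hb
  have hble : b ≤ 10 := Nat.size_le.mpr (Nat.mod_lt _ (by norm_num))
  have hbpos : 1 ≤ b := by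
    have := Nat.lt_size.mpr (show 2 ^ 0 ≤ n % 1024 by omega)
    omega
  have hfuel : 10 - b ≤ 64 := by omega
  set k : Nat := 10 - b with hk
  have hsgn := sign_closed i hi
  rw [habs] at hsgn
  have hA : to_hpf i = hpf_join (Int.land (Int.shiftLeft ((((n <<< k : Nat)) : Int)) 1) (2 ^ 10 - 1))
      (24 - ((k : Nat) : Int)) (if i < 0 then 1 else 0) := by
    simp only [to_hpf, if_neg hi, habs, loop_closed 64 n 24 hm hfuel, hsgn, hb, hk]
  have hland : n &&& 1023 = n % 1024 := by
    have := Nat.and_two_pow_sub_one_eq_mod n 10; norm_num at this; exact this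
  have hB : to_hpf_alt i = ((((n % 1024) <<< (11 - b)) &&& 1023) + ((14 + b) <<< 10)
      + ((if i < 0 then 1 else 0 : Nat) <<< 15) : Nat) := by
    simp only [to_hpf_alt, if_neg hi, ← hn, hland, hb]
  have e1 : ∀ a : Nat, a &&& 1023 = a % 1024 := fun a => by
    have := Nat.and_two_pow_sub_one_eq_mod a 10; norm_num at this; exact this
  have hjoin : ∀ (ma ex sg : Nat), hpf_join ((ma : Nat) : Int) ((ex : Nat) : Int) ((sg : Nat) : Int)
      = ((((ma &&& 1023) + ((ex &&& 31) <<< 10) + ((sg &&& 1) <<< 15) : Nat)) : Int) :=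
    fun ma ex sg => rfl
  have hm1 : Int.land (Int.shiftLeft ((((n <<< k : Nat)) : Int)) 1) (2 ^ 10 - 1)
      = (((n <<< k <<< 1) &&& 1023 : Nat) : Int) := rfl
  have hexpv : (24 : Int) - ((k : Nat) : Int) = (((14 + b : Nat)) : Int) := by
    push_cast; omega
  have hmant : ((n <<< k <<< 1) &&& 1023) &&& 1023 = ((n % 1024) <<< (11 - b)) &&& 1023 := by
    rw [e1, e1, e1, Nat.mod_mod_of_dvd _ (dvd_refl 1024)]
    rw [Nat.shiftLeft_eq, Nat.shiftLeft_eq, Nat.shiftLeft_eq, Nat.mod_mul_mod]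
    have hp : 2 ^ k * 2 ^ 1 = 2 ^ (11 - b) := by
      rw [← pow_add]; congr 1; omega
    rw [mul_assoc, hp]
  have hexpm : (14 + b) &&& 31 = 14 + b := by
    have h31 := Nat.and_two_pow_sub_one_eq_mod (14 + b) 5
    norm_num at h31
    rw [h31, Nat.mod_eq_of_lt (by omega)]
  rw [hA, hB, hm1, hexpv]
  by_cases hneg : i < 0
  · rw [if_pos hneg, if_pos hneg]
    rw [show (1 : Int) = ((1 : Nat) : Int) from rfl, hjoin]
    congr 1
    rw [hmant, hexpm, show (1 &&& 1 : Nat) = 1 from rfl]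
  · rw [if_neg hneg, if_neg hneg]
    rw [show (0 : Int) = ((0 : Nat) : Int) from rfl, hjoin]
    congr 1
    rw [hmant, hexpm, show (0 &&& 1 : Nat) = 0 from rfl]
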